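-- pv_equiv track=rewrite | github.com/nikhilgurnani/dailyproblems | salary_cap.py | computeSalaryCap
-- ===== SOURCE A (Python) =====
-- def computeSalaryCap(salaries, budget):
--     '''
--     :type salaries: list of int
--     :type budget: int
--     :rtype: int
--     '''
--
--     """
--     salaries = [100, 300, 200, 400]
--     budget = 800
--
--     total = 1000
--     diff = total - budget = 1000 - 800 => 200
--     sorted_salaries = [100, 200, 300, 400]
--     """
--
--     salaries = sorted(salaries)
--
--     i = len(salaries) - 1
--
--     while i > 0:
--         total = 0
--         for k in range(0, i):
--             total += salaries[k]
--
--         k = budget - total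
--         if k >= salaries[i-1]:
--             pos = len(salaries)-i
--             return k // i
--         i -= 1
--
--     return budget // len(salaries)
-- ===== SOURCE B (Python) =====
-- def computeSalaryCap(salaries, budget):
--     s = sorted(salaries)
--     run = sum(s) - s[-1]  # sum of the first len(s)-1 salaries
--     for i in range(len(s) - 1, 0, -1):
--         if budget - run >= s[i - 1]:
--             return (budget - run) // i
--         run -= s[i - 1]
--     return budget // len(s)
-- ===== Notes on version B (the rewrite author's own statement) =====
-- stated objective: faster
-- what changed: A recomputes the prefix sum from scratch with an inner loop on every iteration of its descending scan; B sorts once and does a single descending pass maintaining a running prefix sum, eliminating the inner loop.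
-- outside the precondition, e.g. on computeSalaryCap([], 100): A raises ZeroDivisionError, B raises IndexError
import Mathlib
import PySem

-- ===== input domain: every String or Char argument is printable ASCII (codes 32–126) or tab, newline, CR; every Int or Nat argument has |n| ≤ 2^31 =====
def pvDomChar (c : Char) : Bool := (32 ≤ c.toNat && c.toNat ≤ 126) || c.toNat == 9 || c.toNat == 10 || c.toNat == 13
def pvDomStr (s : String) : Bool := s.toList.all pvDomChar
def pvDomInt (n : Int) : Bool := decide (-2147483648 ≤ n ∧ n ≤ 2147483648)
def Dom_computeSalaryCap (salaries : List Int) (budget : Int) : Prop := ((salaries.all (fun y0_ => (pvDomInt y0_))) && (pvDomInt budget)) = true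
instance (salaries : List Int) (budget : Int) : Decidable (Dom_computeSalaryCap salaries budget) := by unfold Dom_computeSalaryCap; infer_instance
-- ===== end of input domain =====

-- B replaces A's quadratic re-summation of the prefix (a nested for-loop per while-iteration)
-- by a single descending pass maintaining a running prefix sum: O(n log n) vs O(n^2).

-- ===== PORT A =====
-- while-loop of A: argument is the Python loop variable i (i = 0 means the loop has ended).
-- indices salaries[k] / salaries[i-1] are always in range on A's iterations, so pyGetD with default 0 is exact there.
def pvAGo (s : List Int) (budget : Int) : Nat → Int
  | 0 => PySem.Int.floordiv budget (s.length : Int)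
  | i + 1 =>
    let total := (PySem.List.pyRange 0 ((i : Int) + 1) 1).foldl
      (fun t k => t + PySem.List.pyGetD s k 0) 0
    let k := budget - total
    if k ≥ PySem.List.pyGetD s (i : Int) 0 then PySem.Int.floordiv k ((i : Int) + 1)
    else pvAGo s budget i

def computeSalaryCap (salaries : List Int) (budget : Int) : Int :=
  let s := PySem.List.sorted salaries (fun x => x) false
  pvAGo s budget (s.length - 1)

-- ===== PORT B =====
-- for-loop of B over range(len(s)-1, 0, -1), carrying the running prefix sum `run`.
def pvBGo (s : List Int) (budget : Int) : Int → Nat → Int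
  | _run, 0 => PySem.Int.floordiv budget (s.length : Int)
  | run, i + 1 =>
    if budget - run ≥ PySem.List.pyGetD s (i : Int) 0 then
      PySem.Int.floordiv (budget - run) ((i : Int) + 1)
    else pvBGo s budget (run - PySem.List.pyGetD s (i : Int) 0) i

def computeSalaryCap_alt (salaries : List Int) (budget : Int) : Int :=
  let s := PySem.List.sorted salaries (fun x => x) false
  pvBGo s budget (s.sum - PySem.List.pyGetD s (-1) 0) (s.length - 1)

-- ===== PRECONDITION & SPEC =====
-- On the empty list A raises ZeroDivisionError (budget // 0) and B raises IndexError (s[-1]); excluded.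
def Pre_computeSalaryCap (salaries : List Int) (budget : Int) : Prop := salaries ≠ []
instance (salaries : List Int) (budget : Int) : Decidable (Pre_computeSalaryCap salaries budget) := by
  unfold Pre_computeSalaryCap; infer_instance

def pvWitness_computeSalaryCap : List Int × Int := ([100, 300, 200, 400], 800)

def Spec_computeSalaryCap (salaries : List Int) (budget : Int) (out : Int) : Prop := out = computeSalaryCap_alt salaries budget
instance (salaries : List Int) (budget : Int) (out : Int) : Decidable (Spec_computeSalaryCap salaries budget out) := by unfold Spec_computeSalaryCap; infer_instance

-- ===== CLAIM (what is proved, stated in full; the proofs are below) =====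
def Claim_equal_computeSalaryCap : Prop := ∀ (salaries : List Int) (budget : Int), Dom_computeSalaryCap salaries budget → Pre_computeSalaryCap salaries budget → Spec_computeSalaryCap salaries budget (computeSalaryCap salaries budget)

-- ===== LEMMAS AND PROOFS =====

-- A's inner for-loop over range(0, m) computes the sum of the first m elements.
lemma pv_fold_take (s : List Int) :
    ∀ m : Nat, m ≤ s.length →
      (PySem.List.pyRange 0 (m : Int) 1).foldl (fun t k => t + PySem.List.pyGetD s k 0) 0
        = (s.take m).sum := by
  intro m
  induction m with
  | zero => intro _; simp
  | succ m ih =>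
    intro h
    have hm : m < s.length := by omega
    have hsplit : PySem.List.pyRange 0 ((m : Int) + 1) 1
        = PySem.List.pyRange 0 (m : Int) 1 ++ [(m : Int)] := by
      exact PySem.List.pyRange_one_succ_right (by omega)
    push_cast
    rw [hsplit, List.foldl_append, ih (by omega), List.sum_take_succ s m hm]
    simp only [List.foldl_cons, List.foldl_nil]
    rw [PySem.List.pyGetD_natCast, List.getD_eq_getElem s 0 hm]

-- core equivalence of the two loops, with B's running-sum invariant
lemma pv_go_eq (s : List Int) (budget : Int) :
    ∀ i : Nat, i < s.length →
      pvAGo s budget i = pvBGo s budget ((s.take i).sum) i := by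
  intro i
  induction i with
  | zero => intro _; simp [pvAGo, pvBGo]
  | succ i ih =>
    intro h
    have hi : i < s.length := by omega
    have htake : (s.take (i + 1)).sum = (s.take i).sum + s[i] := List.sum_take_succ s i hi
    have htot := pv_fold_take s (i + 1) (by omega)
    have hget : PySem.List.pyGetD s (i : Int) 0 = s[i] := by
      rw [PySem.List.pyGetD_natCast, List.getD_eq_getElem s 0 hi]
    simp only [pvAGo, pvBGo]
    push_cast at htot
    rw [htot, hget]
    split_ifs with hc
    · rfl
    · rw [ih hi]
      have hsub : (s.take (i + 1)).sum - s[i] = (s.take i).sum := by omega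
      rw [hsub]

-- s[-1] is the last element of a nonempty list
lemma pv_get_neg_one (s : List Int) (h : s ≠ []) :
    PySem.List.pyGetD s (-1) 0 = s[s.length - 1]'(by
      have := List.length_pos_of_ne_nil h; omega) := by
  have hlen : 0 < s.length := List.length_pos_of_ne_nil h
  simp only [PySem.List.pyGetD, PySem.List.pyGet?, PySem.List.pyIdx?]
  rw [if_neg (show ¬ (0 : Int) ≤ -1 by omega),
      if_pos (show -(s.length : Int) ≤ -1 by omega)]
  have h2 : s.length - (-(-1 : Int)).toNat = s.length - 1 := by omega
  rw [h2]
  simp [List.getElem?_eq_getElem (show s.length - 1 < s.length by omega)]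

-- ===== VERDICT (by name: the statement is the Claim_ definition above) =====
theorem computeSalaryCap_spec : Claim_equal_computeSalaryCap := by
  intro salaries budget _ hpre
  unfold Spec_computeSalaryCap computeSalaryCap computeSalaryCap_alt
  set s := PySem.List.sorted salaries (fun x => x) false with hs
  have hlen : 0 < s.length := by
    rw [hs, PySem.List.length_sorted]
    exact List.length_pos_of_ne_nil hpre
  have hne : s ≠ [] := by
    intro hnil; rw [hnil] at hlen; simp at hlen
  have hrun : s.sum - PySem.List.pyGetD s (-1) 0 = (s.take (s.length - 1)).sum := by
    rw [pv_get_neg_one s hne]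
    have h1 : s.length - 1 < s.length := by omega
    have : (s.take (s.length - 1 + 1)).sum = (s.take (s.length - 1)).sum + s[s.length - 1] :=
      List.sum_take_succ s (s.length - 1) h1
    have h2 : s.length - 1 + 1 = s.length := by omega
    rw [h2, List.take_length] at this
    omega
  show pvAGo s budget (s.length - 1)
      = pvBGo s budget (s.sum - PySem.List.pyGetD s (-1) 0) (s.length - 1)
  rw [hrun]
  exact pv_go_eq s budget (s.length - 1) (by omega)
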